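-- pv_equiv track=rewrite | github.com/HansenHomeAI/v0-spaceport-website | infrastructure/spaceport_cdk/spaceport_cdk/ml_pipeline_stack.py | _is_valid_resource_name
-- ===== SOURCE A (Python) =====
-- def _is_valid_resource_name(name: str, suffix: str) -> bool:
--     """Check if resource name follows conventions"""
--     # Must contain the suffix
--     if not name.endswith(f"-{suffix}"):
--         return False
--
--     # Must start with Spaceport
--     if not name.startswith("Spaceport"):
--         return False
--
--     # No invalid characters
--     if any(char in name for char in [' ', '_', '.']):
--         return False
--
--     return True
-- ===== SOURCE B (Python) =====
-- def _is_valid_resource_name(name: str, suffix: str) -> bool: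
--     # Positional check: a valid name is exactly "Spaceport" + middle + "-" + suffix
--     # with no ' ', '_' or '.' anywhere; one indexed pass instead of three scans.
--     k = len(name) - len(suffix) - 1
--     if k < 9:
--         return False
--     for i, c in enumerate(name):
--         if c in ' _.':
--             return False
--         if i < 9 and c != "Spaceport"[i]:
--             return False
--         if i == k and c != '-':
--             return False
--         if i > k and c != suffix[i - k - 1]:
--             return False
--     return True
-- ===== Notes on version B (the rewrite author's own statement) =====
-- stated objective: alternative
-- what changed: Replaces A's three separate scans (endswith, startswith, per-character substring membership tests) with an up-front length computation and a single indexed left-to-right pass that checks each position of the name against its expected role (prefix char, dash position, suffix char, forbidden char).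
import Mathlib
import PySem

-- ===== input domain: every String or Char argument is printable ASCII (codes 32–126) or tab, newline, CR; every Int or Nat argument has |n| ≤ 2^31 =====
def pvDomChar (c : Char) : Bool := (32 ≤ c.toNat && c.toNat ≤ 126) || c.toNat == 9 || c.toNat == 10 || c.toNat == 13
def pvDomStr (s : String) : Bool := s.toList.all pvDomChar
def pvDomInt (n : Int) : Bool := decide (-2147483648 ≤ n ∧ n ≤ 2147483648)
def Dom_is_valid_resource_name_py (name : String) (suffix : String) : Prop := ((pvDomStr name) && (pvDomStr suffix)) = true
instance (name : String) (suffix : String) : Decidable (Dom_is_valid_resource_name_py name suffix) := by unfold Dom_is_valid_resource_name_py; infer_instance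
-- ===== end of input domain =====

-- B replaces A's three scans (endswith / startswith / substring membership) by one
-- indexed pass checking each position against its expected role; objective: alternative.

-- ===== PORT A =====
def is_valid_resource_name_py (name : String) (suffix : String) : Bool :=
  if !(PySem.Chars.endswith name.toList ('-' :: suffix.toList)) then false
  else if !(PySem.Chars.startswith name.toList "Spaceport".toList) then false
  else if [' ', '_', '.'].any (fun ch => PySem.Chars.isIn [ch] name.toList) then false
  else true

-- ===== PORT B =====
-- the literal "Spaceport" indexed by position in B's loop
def pvSpaceportChars : List Char := "Spaceport".toList

-- B's single for-loop over enumerate(name): i is the index, early-return chain as in Source B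
def pvAltLoop (k : Nat) (sfx : List Char) : Nat → List Char → Bool
  | _, [] => true
  | i, c :: cs =>
    if c == ' ' || c == '_' || c == '.' then false
    else if decide (i < 9) && (c != pvSpaceportChars.getD i ' ') then false
    else if (i == k) && (c != '-') then false
    else if decide (k < i) && (c != sfx.getD (i - k - 1) ' ') then false
    else pvAltLoop k sfx (i + 1) cs

def is_valid_resource_name_py_alt (name : String) (suffix : String) : Bool :=
  let n := name.toList
  let s := suffix.toList
  -- k = len(name) - len(suffix) - 1 ; "k < 9" is exactly len(name) < len(suffix) + 10
  if n.length < s.length + 10 then false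
  else pvAltLoop (n.length - s.length - 1) s 0 n

-- ===== PRECONDITION & SPEC =====
def Spec_is_valid_resource_name_py (name : String) (suffix : String) (out : Bool) : Prop := out = is_valid_resource_name_py_alt name suffix
instance (name : String) (suffix : String) (out : Bool) : Decidable (Spec_is_valid_resource_name_py name suffix out) := by unfold Spec_is_valid_resource_name_py; infer_instance

-- ===== CLAIM (what is proved, stated in full; the proofs are below) =====
def Claim_equal_is_valid_resource_name_py : Prop := ∀ (name : String) (suffix : String), Dom_is_valid_resource_name_py name suffix → Spec_is_valid_resource_name_py name suffix (is_valid_resource_name_py name suffix)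

-- ===== LEMMAS AND PROOFS =====

-- the per-position condition B's loop enforces at index i with character c
def pvPos (k : Nat) (sfx : List Char) (i : Nat) (c : Char) : Prop :=
  ¬(c = ' ' ∨ c = '_' ∨ c = '.') ∧
  (i < 9 → c = pvSpaceportChars.getD i ' ') ∧
  (i = k → c = '-') ∧
  (k < i → c = sfx.getD (i - k - 1) ' ')

theorem pvAltLoop_iff (k : Nat) (sfx : List Char) (i : Nat) (cs : List Char) :
    pvAltLoop k sfx i cs = true ↔ ∀ j, j < cs.length → pvPos k sfx (i + j) (cs.getD j ' ') := by
  induction cs generalizing i with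
  | nil => simp [pvAltLoop]
  | cons c cs ih =>
    rw [pvAltLoop]
    by_cases hbad : c = ' ' ∨ c = '_' ∨ c = '.'
    · constructor
      · intro h
        exfalso
        rcases hbad with h1 | h1 | h1 <;> simp [h1] at h
      · intro h
        exact absurd hbad (h 0 (by simp)).1
    · have hb : (c == ' ' || c == '_' || c == '.') = false := by
        simp only [Bool.or_eq_false_iff, beq_eq_false_iff_ne]
        tauto
      rw [hb]
      simp only [Bool.false_eq_true, if_false]
      constructor
      · intro h j hj
        split_ifs at h with h1 h2 h3
        match j, hj with
        | 0, _ =>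
          refine ⟨hbad, ?_, ?_, ?_⟩
          · intro hlt
            by_contra hc
            simp only [Nat.add_zero] at hlt
            simp only [List.getD_cons_zero, Nat.add_zero] at hc
            exact h1 (by
              simp only [Bool.and_eq_true, decide_eq_true_eq, bne_iff_ne, ne_eq]
              exact ⟨hlt, hc⟩)
          · intro hik
            by_contra hc
            simp only [Nat.add_zero] at hik
            simp only [List.getD_cons_zero] at hc
            exact h2 (by simp [hik, hc])
          · intro hki
            by_contra hc
            simp only [Nat.add_zero] at hki
            simp only [List.getD_cons_zero, Nat.add_zero] at hc
            exact h3 (by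
              simp only [Bool.and_eq_true, decide_eq_true_eq, bne_iff_ne, ne_eq]
              exact ⟨hki, hc⟩)
        | j + 1, hj =>
          have := (ih (i + 1)).mp h j (by simpa using Nat.lt_of_succ_lt_succ hj)
          simpa [Nat.add_comm, Nat.add_assoc, Nat.add_left_comm] using this
      · intro h
        have h0 := h 0 (by simp)
        simp only [Nat.add_zero, List.getD_cons_zero] at h0
        obtain ⟨-, hpre, hdash, hsfx⟩ := h0
        have g1 : (decide (i < 9) && (c != pvSpaceportChars.getD i ' ')) = false := by
          by_cases hi : i < 9
          · simp [hi, hpre hi]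
          · simp [hi]
        have g2 : ((i == k) && (c != '-')) = false := by
          by_cases hi : i = k
          · simp [hi, hdash hi]
          · simp [hi]
        have g3 : (decide (k < i) && (c != sfx.getD (i - k - 1) ' ')) = false := by
          by_cases hi : k < i
          · simp [hi, hsfx hi]
          · simp [hi]
        rw [g1, g2, g3]
        simp only [Bool.false_eq_true, if_false]
        refine (ih (i + 1)).mpr ?_
        intro j hj
        have := h (j + 1) (by simpa using Nat.succ_lt_succ hj)
        simpa [Nat.add_comm, Nat.add_assoc, Nat.add_left_comm] using this

-- the common pointwise characterisation both ports are reduced to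
def pvCanon (n s : List Char) : Prop :=
  s.length + 10 ≤ n.length ∧
  (∀ j, j < 9 → n.getD j ' ' = pvSpaceportChars.getD j ' ') ∧
  n.getD (n.length - s.length - 1) ' ' = '-' ∧
  (∀ j, n.length - s.length - 1 < j → j < n.length →
      n.getD j ' ' = s.getD (j - (n.length - s.length - 1) - 1) ' ') ∧
  ∀ c ∈ n, ¬(c = ' ' ∨ c = '_' ∨ c = '.')

-- [c] is an infix of n exactly when c is an element of n
theorem pv_singleton_infix {c : Char} {n : List Char} : [c] <:+: n ↔ c ∈ n := by
  constructor
  · intro h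
    exact h.mem (by simp)
  · intro h
    obtain ⟨l₁, l₂, rfl⟩ := List.append_of_mem h
    exact ⟨l₁, l₂, by simp⟩

theorem pvS_len : pvSpaceportChars.length = 9 := rfl

-- B = true ↔ pointwise characterisation
theorem pvB_iff (name suffix : String) :
    is_valid_resource_name_py_alt name suffix = true ↔ pvCanon name.toList suffix.toList := by
  unfold is_valid_resource_name_py_alt pvCanon
  set n := name.toList with hn
  set s := suffix.toList with hs
  by_cases hlen : n.length < s.length + 10
  · simp only [hlen, if_true]
    constructor
    · intro h; exact absurd h (by simp)
    · rintro ⟨h, -⟩; omega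
  · simp only [hlen, if_false]
    push_neg at hlen
    rw [pvAltLoop_iff]
    simp only [Nat.zero_add]
    constructor
    · intro h
      refine ⟨by omega, ?_, ?_, ?_, ?_⟩
      · intro j hj
        exact (h j (by omega)).2.1 hj
      · exact (h (n.length - s.length - 1) (by omega)).2.2.1 rfl
      · intro j hkj hjn
        exact (h j hjn).2.2.2 hkj
      · intro c hc hor
        obtain ⟨j, hj, rfl⟩ := List.mem_iff_getElem.mp hc
        have := (h j hj).1
        rw [List.getD_eq_getElem _ _ hj] at this
        exact this hor
    · rintro ⟨-, hpre, hdash, hsfx, hbad⟩ j hj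
      refine ⟨?_, ?_, ?_, ?_⟩
      · rw [List.getD_eq_getElem _ _ hj]
        exact hbad _ (List.getElem_mem hj)
      · intro h9
        exact hpre j h9
      · intro hk
        rw [hk]
        exact hdash
      · intro hkj
        exact hsfx j hkj hj

-- A = true ↔ pointwise characterisation
theorem pvA_iff (name suffix : String) :
    is_valid_resource_name_py name suffix = true ↔ pvCanon name.toList suffix.toList := by
  unfold is_valid_resource_name_py pvCanon
  set n := name.toList with hn
  set s := suffix.toList with hs
  constructor
  · intro h
    split_ifs at h with h1 h2 h3
    simp only [Bool.not_eq_true', Bool.not_eq_false] at h1 h2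
    have hsuf : ('-' :: s) <:+ n := (PySem.Chars.endswith_iff _ _).mp h1
    have hpre : pvSpaceportChars <+: n := (PySem.Chars.startswith_iff _ _).mp h2
    have hbad : ∀ c ∈ n, ¬(c = ' ' ∨ c = '_' ∨ c = '.') := by
      intro c hc hor
      apply h3
      simp only [List.any_eq_true]
      rcases hor with rfl | rfl | rfl
      · exact ⟨' ', by simp, (PySem.Chars.isIn_iff_infix _ _).mpr (pv_singleton_infix.mpr hc)⟩
      · exact ⟨'_', by simp, (PySem.Chars.isIn_iff_infix _ _).mpr (pv_singleton_infix.mpr hc)⟩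
      · exact ⟨'.', by simp, (PySem.Chars.isIn_iff_infix _ _).mpr (pv_singleton_infix.mpr hc)⟩
    have hlen9 : 9 ≤ n.length := by
      have := hpre.length_le
      rw [pvS_len] at this
      omega
    have hlens : s.length + 1 ≤ n.length := by
      have := hsuf.length_le
      simp at this
      omega
    have htake : n.take 9 = pvSpaceportChars := by
      have := List.prefix_iff_eq_take.mp hpre
      rw [pvS_len] at this
      exact this.symm
    have hpre' : ∀ j, j < 9 → n.getD j ' ' = pvSpaceportChars.getD j ' ' := by
      intro j hj
      have h1 : (n.take 9).getD j ' ' = n.getD j ' ' := by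
        rw [List.getD_eq_getElem _ _ (by simp [List.length_take]; omega),
          List.getD_eq_getElem _ _ (by omega), List.getElem_take]
      rw [← h1, htake]
    have hdrop : n.drop (n.length - (s.length + 1)) = '-' :: s := by
      have := List.suffix_iff_eq_drop.mp hsuf
      simp only [List.length_cons] at this
      exact this.symm
    have hdropD : ∀ j, j < s.length + 1 →
        n.getD (n.length - (s.length + 1) + j) ' ' = ('-' :: s).getD j ' ' := by
      intro j hj
      have h1 : (n.drop (n.length - (s.length + 1))).getD j ' ' =
          n.getD (n.length - (s.length + 1) + j) ' ' := by
        rw [List.getD_eq_getElem _ _ (by simp [List.length_drop]; omega),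
          List.getD_eq_getElem _ _ (by omega), List.getElem_drop]
      rw [← h1, hdrop]
    have hdash0 : n.getD (n.length - (s.length + 1)) ' ' = '-' := by
      have := hdropD 0 (by omega)
      simpa using this
    -- the dash sits at index len(n)-len(s)-1; were that index < 9 it would be a
    -- character of "Spaceport", none of which is '-'
    have hklen : 9 ≤ n.length - (s.length + 1) := by
      by_contra hk
      push_neg at hk
      have h1 := hpre' (n.length - (s.length + 1)) hk
      have h2 : pvSpaceportChars.getD (n.length - (s.length + 1)) ' ' = '-' := by
        rw [← h1, hdash0]
      rw [List.getD_eq_getElem _ _ (by rw [pvS_len]; omega)] at h2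
      have hmem : '-' ∈ pvSpaceportChars := h2 ▸ List.getElem_mem _
      exact absurd hmem (by decide)
    refine ⟨by omega, hpre', ?_, ?_, hbad⟩
    · have e : n.length - s.length - 1 = n.length - (s.length + 1) := by omega
      rw [e]
      exact hdash0
    · intro j hdj hjn
      have e0 : n.length - s.length - 1 = n.length - (s.length + 1) := by omega
      rw [e0] at hdj ⊢
      have h1 := hdropD (j - (n.length - (s.length + 1))) (by omega)
      have e1 : n.length - (s.length + 1) + (j - (n.length - (s.length + 1))) = j := by omega
      rw [e1] at h1
      have e2 : j - (n.length - (s.length + 1)) =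
          (j - (n.length - (s.length + 1)) - 1) + 1 := by omega
      rw [e2, List.getD_cons_succ] at h1
      exact h1
  · rintro ⟨hl, hpre', hdash, hsfx, hbad⟩
    have htake : n.take 9 = pvSpaceportChars := by
      apply List.ext_getElem (by rw [pvS_len]; simp; omega)
      intro j hj hj'
      have hj9 : j < 9 := by rw [pvS_len] at hj'; exact hj'
      have hjn : j < n.length := by omega
      have h1 := hpre' j hj9
      rw [List.getD_eq_getElem _ _ hjn, List.getD_eq_getElem _ _ hj'] at h1
      rw [List.getElem_take]
      exact h1
    have hdropEq : n.drop (n.length - s.length - 1) = '-' :: s := by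
      apply List.ext_getElem (by simp; omega)
      intro j hj hj'
      have hjs : j < s.length + 1 := by simpa using hj'
      rw [List.getElem_drop]
      match j, hjs with
      | 0, _ =>
        simp only [List.getElem_cons_zero, Nat.add_zero]
        have := hdash
        rwa [List.getD_eq_getElem _ _ (by omega)] at this
      | j + 1, hjs =>
        simp only [List.getElem_cons_succ]
        have hjlt : n.length - s.length - 1 + (j + 1) < n.length := by omega
        have h1 := hsfx (n.length - s.length - 1 + (j + 1)) (by omega) hjlt
        have e1 : n.length - s.length - 1 + (j + 1) - (n.length - s.length - 1) - 1 = j := by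
          omega
        rw [e1] at h1
        rw [List.getD_eq_getElem _ _ hjlt, List.getD_eq_getElem _ _ (by omega)] at h1
        exact h1
    have h1 : PySem.Chars.endswith n ('-' :: s) = true := by
      refine (PySem.Chars.endswith_iff _ _).mpr ?_
      refine List.suffix_iff_eq_drop.mpr ?_
      have e : n.length - ('-' :: s).length = n.length - s.length - 1 := by
        simp only [List.length_cons]; omega
      rw [e]
      exact hdropEq.symm
    have h2 : PySem.Chars.startswith n "Spaceport".toList = true := by
      refine (PySem.Chars.startswith_iff _ _).mpr ?_
      refine List.prefix_iff_eq_take.mpr ?_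
      have e : ("Spaceport".toList : List Char).length = 9 := rfl
      rw [e]
      exact htake.symm
    have h3 : ([' ', '_', '.'].any (fun ch => PySem.Chars.isIn [ch] n)) = false := by
      simp only [List.any_eq_false]
      intro ch hch
      simp only [Bool.not_eq_true]
      rw [← Bool.not_eq_true, PySem.Chars.isIn_iff_infix, pv_singleton_infix]
      intro hmem
      apply hbad ch hmem
      simpa using hch
    rw [h1, h2, h3]
    simp

-- ===== VERDICT (by name: the statement is the Claim_ definition above) =====
theorem is_valid_resource_name_py_spec : Claim_equal_is_valid_resource_name_py := by
  intro name suffix _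
  unfold Spec_is_valid_resource_name_py
  have := (pvA_iff name suffix).trans (pvB_iff name suffix).symm
  cases hA : is_valid_resource_name_py name suffix <;>
    cases hB : is_valid_resource_name_py_alt name suffix <;>
    simp_all
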